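-- pv_equiv track=rewrite | github.com/wyk18703232953/myResearch | codeComplex/data/filteredData/python/linear/python_linear_0083.py | chain_reaction
-- ===== SOURCE A (Python) =====
-- def chain_reaction(n, beacons):
--     table = [0] * n
--     # table[i] represents the number of beacons destroyed if the first i beacons are used
--     for i in range(n):
--         position = beacons[i][0]
--         power = beacons[i][1]
--         destroyed = 0
--         r = position - power
--         # use binary search to find the beacon that will be activated after the current one
--         lo = 0
--         hi = len(beacons) - 1
--         while lo <= hi:
--             mid = int(lo + (hi - lo) / 2)
--             if beacons[mid][0] < r:
--                 lo = mid + 1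
--             else:
--                 hi = mid - 1
--         # beacons destroyed by next activated one
--         if hi >= 0:
--             destroyed += table[hi]
--         # beacons destroyed by currently activated one
--         destroyed += (i - (hi + 1))
--         table[i] = destroyed
--
--     # find first index of max # of beacons destroyed
--     cost = n
--     ind = 0
--     while ind < len(table):
--         cost = min(cost, n - ind - 1 + table[ind])
--         ind += 1
--
--     # options: add a beacon that doesn't destroy any or add a beacon that destroys the beacon at index ind
--     return cost
-- ===== SOURCE B (Python) =====
-- def chain_reaction(n, beacons):
--     table = []
--     for i in range(n):
--         position, power = beacons[i]
--         r = position - power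
--         count = sum(1 for b in beacons if b[0] < r)
--         table.append((table[count - 1] if count > 0 else 0) + (i - count))
--     return min([n] + [n - i - 1 + d for i, d in enumerate(table)])
-- ===== Notes on version B (the rewrite author's own statement) =====
-- stated objective: simpler
-- what changed: The inner manual binary-search block is replaced by a direct linear count of beacons with position < position - power, and the mutated [0]*n table plus the index-while cost scan become a grown list with append and a single min over a comprehension.
-- outside the precondition, e.g. on chain_reaction(3, [(5, 1), (1, 1), (3, 1)]): A returns -1, B raises IndexError; on chain_reaction(1, [(0, -2)]): A returns -1, B raises IndexError
import Mathlib
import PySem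

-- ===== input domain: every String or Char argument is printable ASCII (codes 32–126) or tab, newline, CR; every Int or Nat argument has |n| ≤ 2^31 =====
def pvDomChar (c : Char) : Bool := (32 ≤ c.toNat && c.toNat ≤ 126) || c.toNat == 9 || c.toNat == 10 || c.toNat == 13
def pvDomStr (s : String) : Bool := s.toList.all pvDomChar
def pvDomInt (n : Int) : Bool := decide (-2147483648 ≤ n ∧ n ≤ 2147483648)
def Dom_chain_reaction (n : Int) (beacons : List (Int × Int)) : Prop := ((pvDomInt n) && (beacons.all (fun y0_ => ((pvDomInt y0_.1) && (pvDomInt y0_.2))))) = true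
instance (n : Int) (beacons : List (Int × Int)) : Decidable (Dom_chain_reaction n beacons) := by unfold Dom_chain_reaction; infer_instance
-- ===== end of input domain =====

-- B replaces A's hand-written binary search by a direct linear count of beacons with
-- position < position - power and the mutated [0]*n table by a grown list; objective:
-- simpler (not faster).

-- ===== PORT A =====
-- A's `while lo <= hi` binary-search loop; returns the final `hi`.
-- Python's `int(lo + (hi - lo) / 2)` is exact floor division by 2 here (hi - lo ≥ 0,
-- lo ≥ 0 at every call A makes, and all values are far below 2^53), so it is `/ 2` on Int.
def crBsearch (beacons : List (Int × Int)) (r lo hi : Int) : Int :=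
  if lo ≤ hi then
    let mid := lo + (hi - lo) / 2
    if (PySem.List.pyGetD beacons mid (0, 0)).1 < r then
      crBsearch beacons r (mid + 1) hi
    else
      crBsearch beacons r lo (mid - 1)
  else hi
termination_by (hi + 1 - lo).toNat
decreasing_by all_goals omega

-- body of A's `for i in range(n)` loop
def crAstep (beacons : List (Int × Int)) (table : List Int) (i : Int) : List Int :=
  let position := (PySem.List.pyGetD beacons i (0, 0)).1
  let power := (PySem.List.pyGetD beacons i (0, 0)).2
  let r := position - power
  let hi := crBsearch beacons r 0 ((beacons.length : Int) - 1)
  let destroyed := (if 0 ≤ hi then PySem.List.pyGetD table hi 0 else 0) + (i - (hi + 1))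
  table.set i.toNat destroyed

def chain_reaction (n : Int) (beacons : List (Int × Int)) : Int :=
  let table := (PySem.List.pyRange 0 n 1).foldl (crAstep beacons) (List.replicate n.toNat 0)
  (PySem.List.pyRange 0 (table.length : Int) 1).foldl
    (fun cost ind => min cost (n - ind - 1 + PySem.List.pyGetD table ind 0)) n

-- ===== PORT B =====
-- body of B's `for i in range(n)` loop
def crBstep (beacons : List (Int × Int)) (table : List Int) (i : Int) : List Int :=
  let pp := PySem.List.pyGetD beacons i (0, 0)
  let r := pp.1 - pp.2
  let count := beacons.foldl (fun c b => if b.1 < r then c + 1 else c) (0 : Int)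
  table ++ [(if 0 < count then PySem.List.pyGetD table (count - 1) 0 else 0) + (i - count)]

def chain_reaction_alt (n : Int) (beacons : List (Int × Int)) : Int :=
  let table := (PySem.List.pyRange 0 n 1).foldl (crBstep beacons) ([] : List Int)
  ((PySem.List.enumerate table).map (fun p => n - p.1 - 1 + p.2)).foldl min n

-- ===== PRECONDITION & SPEC =====
-- Pre_ admits every n ≤ 0 (both programs return n untouched) and the function's natural
-- domain 0 < n ≤ len(beacons) with positions sorted nondecreasingly and nonnegative powers.
-- It excludes inputs on which A still returns a value: unsorted lists (A's binary search
-- assumes sortedness, so its result there is an accident of probe order) and negative powers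
-- (A then reads a stale 0 from the unfilled table); on these B's linear count raises
-- IndexError or, on small instances, happens to coincide with the searched value, neither of
-- which is claimed. n > len(beacons) makes both raise. See the cited examples.
def Pre_chain_reaction (n : Int) (beacons : List (Int × Int)) : Prop :=
  n ≤ 0 ∨ (n ≤ (beacons.length : Int) ∧ List.Pairwise (fun a b => a.1 ≤ b.1) beacons ∧
    ∀ b ∈ beacons, 0 ≤ b.2)
instance (n : Int) (beacons : List (Int × Int)) : Decidable (Pre_chain_reaction n beacons) := by
  unfold Pre_chain_reaction; infer_instance
def pvWitness_chain_reaction : Int × (List (Int × Int)) := (3, [(1, 2), (4, 1), (6, 3)])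

def Spec_chain_reaction (n : Int) (beacons : List (Int × Int)) (out : Int) : Prop := out = chain_reaction_alt n beacons
instance (n : Int) (beacons : List (Int × Int)) (out : Int) : Decidable (Spec_chain_reaction n beacons out) := by unfold Spec_chain_reaction; infer_instance

-- ===== CLAIM (what is proved, stated in full; the proofs are below) =====
def Claim_equal_chain_reaction : Prop := ∀ (n : Int) (beacons : List (Int × Int)), Dom_chain_reaction n beacons → Pre_chain_reaction n beacons → Spec_chain_reaction n beacons (chain_reaction n beacons)

-- ===== LEMMAS AND PROOFS =====

-- a predicate that is true exactly below a threshold index has countP = the threshold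
theorem cr_countP_threshold {α : Type} (bs : List α) (p : α → Bool) (c : Nat) (hc : c ≤ bs.length)
    (h1 : ∀ (j : Nat) (h : j < bs.length), j < c → p bs[j])
    (h2 : ∀ (j : Nat) (h : j < bs.length), c ≤ j → ¬ p bs[j]) :
    bs.countP p = c := by
  have hsplit : bs = bs.take c ++ bs.drop c := (List.take_append_drop c bs).symm
  have hdrop : (bs.drop c).countP p = 0 := by
    rw [List.countP_eq_zero]
    intro a ha
    obtain ⟨k, hk, rfl⟩ := List.mem_iff_getElem.mp ha
    rw [List.getElem_drop]
    have hk' : k < bs.length - c := by simpa using hk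
    exact h2 (c + k) (by omega) (Nat.le_add_right c k)
  have htake : (bs.take c).countP p = (bs.take c).length := by
    rw [List.countP_eq_length]
    intro a ha
    obtain ⟨k, hk, rfl⟩ := List.mem_iff_getElem.mp ha
    rw [List.getElem_take]
    have hk' : k < c ∧ k < bs.length := by simpa using hk
    exact h1 k hk'.2 hk'.1
  calc bs.countP p = (bs.take c).countP p + (bs.drop c).countP p := by
        conv_lhs => rw [hsplit]; rw [List.countP_append]
    _ = c := by rw [hdrop, htake]; simp [Nat.min_eq_left hc]

-- a predicate false from index c on bounds countP by c
theorem cr_countP_le {α : Type} (bs : List α) (p : α → Bool) (c : Nat)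
    (h2 : ∀ (j : Nat) (h : j < bs.length), c ≤ j → ¬ p bs[j]) :
    bs.countP p ≤ c := by
  have hsplit : bs = bs.take c ++ bs.drop c := (List.take_append_drop c bs).symm
  have hdrop : (bs.drop c).countP p = 0 := by
    rw [List.countP_eq_zero]
    intro a ha
    obtain ⟨k, hk, rfl⟩ := List.mem_iff_getElem.mp ha
    rw [List.getElem_drop]
    have hk' : k < bs.length - c := by simpa using hk
    exact h2 (c + k) (by omega) (Nat.le_add_right c k)
  calc bs.countP p = (bs.take c).countP p + (bs.drop c).countP p := by
        conv_lhs => rw [hsplit]; rw [List.countP_append]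
    _ ≤ c := by rw [hdrop]; simpa using (List.countP_le_length (l := bs.take c)).trans (by simp)

theorem crBsearch_base (bs : List (Int × Int)) (r : Int) (lo : Int)
    (hlo : 0 ≤ lo) (hle : lo ≤ (bs.length : Int))
    (hbelow : ∀ (j : Nat) (h : j < bs.length), (j : Int) < lo → (bs[j].1 < r))
    (habove : ∀ (j : Nat) (h : j < bs.length), lo ≤ (j : Int) → ¬ (bs[j].1 < r)) :
    (bs.countP (fun b => decide (b.1 < r)) : Int) = lo := by
  have := cr_countP_threshold bs (fun b => decide (b.1 < r)) lo.toNat (by omega)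
    (fun j h hj => by simpa using hbelow j h (by omega))
    (fun j h hj => by simpa using habove j h (by omega))
  omega

-- positions are monotone along a sorted list
theorem cr_mono (bs : List (Int × Int)) (hs : List.Pairwise (fun a b => a.1 ≤ b.1) bs)
    (j k : Nat) (hjk : j ≤ k) (hk : k < bs.length) : bs[j].1 ≤ bs[k].1 := by
  rcases Nat.lt_or_ge j k with h | h
  · exact List.pairwise_iff_getElem.mp hs j k (by omega) hk h
  · have : j = k := by omega
    subst this; rfl

-- A's binary search on a position-sorted list lands exactly below the count of positions < r
theorem crBsearch_aux (bs : List (Int × Int)) (r : Int)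
    (hs : List.Pairwise (fun a b => a.1 ≤ b.1) bs) :
    ∀ (m : Nat) (lo hi : Int), (hi + 1 - lo).toNat ≤ m → 0 ≤ lo → hi < (bs.length : Int) →
    lo ≤ hi + 1 →
    (∀ (j : Nat) (h : j < bs.length), (j : Int) < lo → (bs[j].1 < r)) →
    (∀ (j : Nat) (h : j < bs.length), hi < (j : Int) → ¬ (bs[j].1 < r)) →
    crBsearch bs r lo hi = ((bs.countP (fun b => decide (b.1 < r)) : Int)) - 1 := by
  intro m
  induction m with
  | zero =>
    intro lo hi hm hlo hhi hlh hb ha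
    have hcond : ¬ lo ≤ hi := by omega
    rw [crBsearch, if_neg hcond]
    have := crBsearch_base bs r lo hlo (by omega) hb (fun j h hj => ha j h (by omega))
    omega
  | succ m IH =>
    intro lo hi hm hlo hhi hlh hb ha
    by_cases hcond : lo ≤ hi
    · rw [crBsearch, if_pos hcond]
      show (if (PySem.List.pyGetD bs (lo + (hi - lo) / 2) (0, 0)).1 < r then
          crBsearch bs r (lo + (hi - lo) / 2 + 1) hi
        else crBsearch bs r lo (lo + (hi - lo) / 2 - 1)) = _
      have hmid : lo ≤ lo + (hi - lo) / 2 ∧ lo + (hi - lo) / 2 ≤ hi := by omega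
      have hmidlt : (lo + (hi - lo) / 2).toNat < bs.length := by omega
      have hget := PySem.List.pyGetD_eq_getElem (xs := bs) (i := lo + (hi - lo) / 2)
        (d := (0, 0)) (by omega) (by omega)
      rw [hget]
      by_cases hp : (bs[(lo + (hi - lo) / 2).toNat]'hmidlt).1 < r
      · rw [if_pos hp]
        refine IH (lo + (hi - lo) / 2 + 1) hi (by omega) (by omega) hhi (by omega) ?_ ha
        intro j h hj
        rcases Int.lt_or_le (j : Int) lo with h' | h'
        · exact hb j h h'
        · exact lt_of_le_of_lt (cr_mono bs hs j (lo + (hi - lo) / 2).toNat (by omega) hmidlt) hp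
      · rw [if_neg hp]
        refine IH lo (lo + (hi - lo) / 2 - 1) (by omega) hlo (by omega) (by omega) hb ?_
        intro j h hj
        rcases Int.lt_or_le (hi : Int) (j : Int) with h' | h'
        · exact ha j h h'
        · intro hcon
          exact hp (lt_of_le_of_lt (cr_mono bs hs (lo + (hi - lo) / 2).toNat j (by omega) h) hcon)
    · rw [crBsearch, if_neg hcond]
      have := crBsearch_base bs r lo hlo (by omega) hb (fun j h hj => ha j h (by omega))
      omega

-- one loop iteration: A's step on the partially-filled table is B's step plus the zero tail
theorem cr_step_eq (bs : List (Int × Int))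
    (hs : List.Pairwise (fun a b => a.1 ≤ b.1) bs) (hpow : ∀ b ∈ bs, 0 ≤ b.2)
    (N : Nat) (hN : N ≤ bs.length) (k : Nat) (hkN : k < N) (Bk : List Int)
    (hBlen : Bk.length = k) :
    crAstep bs (Bk ++ List.replicate (N - k) 0) (k : Int)
      = crBstep bs Bk (k : Int) ++ List.replicate (N - (k + 1)) 0 := by
  have hk : k < bs.length := by omega
  have hgetk : PySem.List.pyGetD bs (k : Int) (0, 0) = bs[k] := by
    simp [PySem.List.pyGetD_natCast, List.getD_eq_getElem?_getD, List.getElem?_eq_getElem hk]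
  have hpk : 0 ≤ bs[k].2 := hpow bs[k] (List.getElem_mem hk)
  have habove : ∀ (j : Nat) (h : j < bs.length), k ≤ j → ¬ (bs[j].1 < bs[k].1 - bs[k].2) := by
    intro j h hj hcon
    have := cr_mono bs hs k j hj h
    omega
  have hcle : bs.countP (fun b => decide (b.1 < bs[k].1 - bs[k].2)) ≤ k :=
    cr_countP_le bs _ k (fun j h hj => by simpa using habove j h hj)
  have hhi : crBsearch bs (bs[k].1 - bs[k].2) 0 ((bs.length : Int) - 1)
      = ((bs.countP (fun b => decide (b.1 < bs[k].1 - bs[k].2)) : Int)) - 1 :=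
    crBsearch_aux bs _ hs bs.length 0 ((bs.length : Int) - 1) (by omega) (by omega)
      (by omega) (by omega) (fun j h hj => by omega) (fun j h hj => by omega)
  have hcntB : bs.foldl (fun c b => if b.1 < bs[k].1 - bs[k].2 then c + 1 else c) (0 : Int)
      = (bs.countP (fun b => decide (b.1 < bs[k].1 - bs[k].2)) : Int) := by
    rw [PySem.List.foldl_ite_add_one]; ring
  simp only [crAstep, crBstep, hgetk, hhi, hcntB]
  set c : Nat := bs.countP (fun b => decide (b.1 < bs[k].1 - bs[k].2)) with hc
  have htoNat : (k : Int).toNat = k := by omega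
  have hread : (if 0 ≤ (c : Int) - 1 then
        PySem.List.pyGetD (Bk ++ List.replicate (N - k) 0) ((c : Int) - 1) 0 else 0)
      = (if 0 < (c : Int) then PySem.List.pyGetD Bk ((c : Int) - 1) 0 else 0) := by
    by_cases h0 : 0 < c
    · rw [if_pos (by omega), if_pos (by omega)]
      rw [PySem.List.pyGetD_eq_getElem (xs := Bk ++ List.replicate (N - k) 0)
          (i := (c : Int) - 1) (d := 0) (by omega) (by simp; omega),
        PySem.List.pyGetD_eq_getElem (xs := Bk) (i := (c : Int) - 1) (d := 0)
          (by omega) (by omega)]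
      rw [List.getElem_append_left (by omega)]
    · rw [if_neg (by omega), if_neg (by omega)]
  rw [hread]
  have harith : (k : Int) - ((c : Int) - 1 + 1) = (k : Int) - (c : Int) := by ring
  rw [harith, htoNat]
  have hrep : List.replicate (N - k) (0 : Int)
      = 0 :: List.replicate (N - (k + 1)) 0 := by
    have : N - k = (N - (k + 1)) + 1 := by omega
    rw [this, List.replicate_succ]
  rw [hrep, ← hBlen]
  simp

-- the two table-building loops agree (A's table = B's table padded with the untouched zeros)
theorem cr_table_eq (bs : List (Int × Int))
    (hs : List.Pairwise (fun a b => a.1 ≤ b.1) bs) (hpow : ∀ b ∈ bs, 0 ≤ b.2)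
    (N : Nat) (hN : N ≤ bs.length) :
    ∀ k : Nat, k ≤ N →
      (PySem.List.pyRange 0 (k : Int) 1).foldl (crAstep bs) (List.replicate N 0)
        = (PySem.List.pyRange 0 (k : Int) 1).foldl (crBstep bs) []
          ++ List.replicate (N - k) 0
      ∧ ((PySem.List.pyRange 0 (k : Int) 1).foldl (crBstep bs) []).length = k := by
  intro k
  induction k with
  | zero =>
    intro _
    simp [PySem.List.pyRange_one_eq_nil]
  | succ k IH =>
    intro hk1
    obtain ⟨ih1, ih2⟩ := IH (by omega)
    have hrange : PySem.List.pyRange 0 ((k + 1 : Nat) : Int) 1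
        = PySem.List.pyRange 0 (k : Int) 1 ++ [(k : Int)] := by
      push_cast
      exact PySem.List.pyRange_one_succ_right (by omega)
    rw [hrange, List.foldl_append, List.foldl_append, ih1]
    simp only [List.foldl]
    constructor
    · exact cr_step_eq bs hs hpow N hN k (by omega) _ ih2
    · simp [crBstep, ih2]

-- the two final min-scans agree once the tables do
theorem cr_cost_eq (n : Int) (T : List Int) :
    (PySem.List.pyRange 0 ((T.length : Int)) 1).foldl
        (fun cost ind => min cost (n - ind - 1 + PySem.List.pyGetD T ind 0)) n
      = ((PySem.List.enumerate T).map (fun p => n - p.1 - 1 + p.2)).foldl min n := by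
  rw [List.foldl_map, PySem.List.enumerate_eq_map_pyRange (d := 0), List.foldl_map]
  simp

theorem chain_reaction_spec : Claim_equal_chain_reaction := by
  intro n bs _ hpre
  unfold Spec_chain_reaction chain_reaction chain_reaction_alt
  by_cases hn0 : n ≤ 0
  · -- n ≤ 0: range(n) is empty and [0]*n is [] on both sides; both return n
    have hnil : PySem.List.pyRange 0 n 1 = [] := PySem.List.pyRange_one_eq_nil hn0
    have htn : n.toNat = 0 := by omega
    simp [hnil, htn, PySem.List.pyRange_one_eq_nil, PySem.List.enumerate_nil]
  · obtain ⟨hlen, hs, hpow⟩ := hpre.resolve_left (by omega)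
    have hcast : n = ((n.toNat : Nat) : Int) := by omega
    have htab := cr_table_eq bs hs hpow n.toNat (by omega) n.toNat le_rfl
    rw [hcast]
    simp only [Int.toNat_natCast]
    rw [htab.1]
    simp only [Nat.sub_self, List.replicate_zero, List.append_nil]
    exact cr_cost_eq _ _
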